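-- pv_equiv track=rewrite | github.com/pranay5255/YudaiV3 | backend/context/yudai-grep/build/lib/train.py | build_tool_map
-- ===== SOURCE A (Python) =====
-- from typing import Dict, List, Tuple
--
-- def build_tool_map(records: List[Dict]) -> Dict[str, int]:
--     tool_to_idx: Dict[str, int] = {}
--     for record in records:
--         for target in record.get("ground_truth", []):
--             tool = target.get("tool")
--             if tool is None:
--                 continue
--             if tool not in tool_to_idx:
--                 tool_to_idx[tool] = len(tool_to_idx)
--     if not tool_to_idx:
--         raise ValueError("No tool labels found in supervised dataset.")
--     return tool_to_idx
-- ===== SOURCE B (Python) =====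
-- def build_tool_map(records):
--     tools = [target.get("tool")
--              for record in records
--              for target in record.get("ground_truth", [])
--              if target.get("tool") is not None]
--     if not tools:
--         raise ValueError("No tool labels found in supervised dataset.")
--     firsts = sorted(set(tools), key=tools.index)
--     return {tool: i for i, tool in enumerate(firsts)}
-- ===== Notes on version B (the rewrite author's own statement) =====
-- stated objective: alternative
-- what changed: Replaces A's single fused loop that assigns len()-based indices into an incrementally grown dict with a sort-based scheme: collect all labels, then rank the distinct labels by sorting them on their first-occurrence position (sorted(set(tools), key=tools.index)) and enumerate the sorted list.
import Mathlib
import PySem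

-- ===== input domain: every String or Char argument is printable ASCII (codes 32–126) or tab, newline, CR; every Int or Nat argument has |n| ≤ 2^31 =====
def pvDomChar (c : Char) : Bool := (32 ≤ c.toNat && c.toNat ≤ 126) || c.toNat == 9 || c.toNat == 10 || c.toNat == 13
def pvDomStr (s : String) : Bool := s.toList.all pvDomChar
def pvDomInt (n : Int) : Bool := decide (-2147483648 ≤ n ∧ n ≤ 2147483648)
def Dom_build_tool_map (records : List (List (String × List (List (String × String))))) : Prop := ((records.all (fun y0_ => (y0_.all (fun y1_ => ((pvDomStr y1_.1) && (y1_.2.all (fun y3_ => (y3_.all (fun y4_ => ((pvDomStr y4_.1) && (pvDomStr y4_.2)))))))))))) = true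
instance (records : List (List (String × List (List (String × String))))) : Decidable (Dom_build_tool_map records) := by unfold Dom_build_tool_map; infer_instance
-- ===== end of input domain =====

-- B ranks the distinct labels by sorting them on their first-occurrence position
-- (sorted(set(tools), key=tools.index)) instead of A's fused loop that grows a dict
-- with len()-based indices inline; an alternative of similar cost.

-- ===== PORT A =====
def build_tool_map (records : List (List (String × List (List (String × String))))) : List (String × Int) :=
  (records.foldl (fun d record =>
      ((PySem.Dict.mk record).getD "ground_truth" []).foldl (fun d target =>
        match (PySem.Dict.mk target).get? "tool" with
        | none => d
        | some tool => if d.contains tool then d else d.insert tool ((PySem.Dict.size d : Nat) : Int))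
        d)
    PySem.Dict.empty).items

-- ===== PORT B =====
-- filterMap get? ports the comprehension's 'target.get("tool") … if target.get("tool") is not None'
-- (get is pure, so evaluating it twice equals evaluating it once); tools.index(t) is exact via
-- index?: every t sorted here is a member of tools, so index? is always some and getD 0 never fires.
def build_tool_map_alt (records : List (List (String × List (List (String × String))))) : List (String × Int) :=
  let tools := records.flatMap (fun record =>
    ((PySem.Dict.mk record).getD "ground_truth" []).filterMap
      (fun target => (PySem.Dict.mk target).get? "tool"))
  let firsts := PySem.List.sorted (PySem.Set.ofList tools)
    (fun t => ((PySem.List.index? tools t).getD 0 : Nat)) false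
  (PySem.List.enumerate firsts 0).map (fun p => (p.2, p.1))

-- ===== PRECONDITION & SPEC =====
-- Pre_ excludes exactly the inputs carrying no tool label at all, on which A raises ValueError (and so does B).
def Pre_build_tool_map (records : List (List (String × List (List (String × String))))) : Prop :=
  ∃ record ∈ records, ∃ target ∈ (PySem.Dict.mk record).getD "ground_truth" ([] : List (List (String × String))),
    ((PySem.Dict.mk target).get? "tool").isSome = true
instance (records : List (List (String × List (List (String × String))))) : Decidable (Pre_build_tool_map records) := by unfold Pre_build_tool_map; infer_instance

def pvWitness_build_tool_map : (List (List (String × List (List (String × String))))) :=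
  [[("ground_truth", [[("tool", "search")]])]]

def Spec_build_tool_map (records : List (List (String × List (List (String × String))))) (out : List (String × Int)) : Prop := out = build_tool_map_alt records
instance (records : List (List (String × List (List (String × String))))) (out : List (String × Int)) : Decidable (Spec_build_tool_map records out) := by unfold Spec_build_tool_map; infer_instance

-- ===== CLAIM (what is proved, stated in full; the proofs are below) =====
def Claim_equal_build_tool_map : Prop := ∀ (records : List (List (String × List (List (String × String))))), Dom_build_tool_map records → Pre_build_tool_map records → Spec_build_tool_map records (build_tool_map records)

-- ===== LEMMAS AND PROOFS =====

-- the dict A's loop has built after seeing the distinct labels u, in order: {u[0]: 0, u[1]: 1, …}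
def eDict (u : List String) : PySem.Dict String Int :=
  PySem.Dict.mk ((PySem.List.enumerate u 0).map (fun p => (p.2, p.1)))

theorem enumerate_append_singleton (u : List String) (x : String) (s : Int) :
    PySem.List.enumerate (u ++ [x]) s = PySem.List.enumerate u s ++ [(s + u.length, x)] := by
  induction u generalizing s with
  | nil => simp [PySem.List.enumerate_cons, PySem.List.enumerate_nil]
  | cons a l ih =>
      simp only [List.cons_append, PySem.List.enumerate_cons, ih, List.length_cons]
      push_cast; ring_nf

theorem keys_eDict (u : List String) : (eDict u).keys = u := by
  show List.map _ (List.map _ _) = u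
  rw [List.map_map]
  exact PySem.List.map_snd_enumerate u 0

theorem size_eDict (u : List String) : PySem.Dict.size (eDict u) = u.length := by
  simp [eDict, PySem.Dict.size, PySem.List.length_enumerate]

theorem eDict_append (u : List String) (x : String) :
    eDict (u ++ [x]) = PySem.Dict.mk ((eDict u).items ++ [(x, (u.length : Int))]) := by
  simp [eDict, enumerate_append_singleton]

-- one step of A's inner body, over an already-extracted tool label
def stepA (d : PySem.Dict String Int) (tool : String) : PySem.Dict String Int :=
  if d.contains tool then d else d.insert tool ((PySem.Dict.size d : Nat) : Int)

theorem inner_loop_eq (targets : List (List (String × String))) (d : PySem.Dict String Int) :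
    targets.foldl (fun d target =>
        match (PySem.Dict.mk target).get? "tool" with
        | none => d
        | some tool => if d.contains tool then d else d.insert tool ((PySem.Dict.size d : Nat) : Int)) d
      = (targets.filterMap (fun target => (PySem.Dict.mk target).get? "tool")).foldl stepA d := by
  induction targets generalizing d with
  | nil => rfl
  | cons a l ih =>
      cases h : (PySem.Dict.mk a).get? "tool" <;> simp [h, ih, stepA]

theorem foldl_flatMap_inner {α β : Type} (l : List α) (h : α → List β)
    (g : PySem.Dict String Int → β → PySem.Dict String Int) (d : PySem.Dict String Int) :
    l.foldl (fun d a => (h a).foldl g d) d = (l.flatMap h).foldl g d := by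
  induction l generalizing d with
  | nil => rfl
  | cons a l ih => simp [List.flatMap_cons, List.foldl_append, ih]

theorem stepA_eDict (u : List String) (t : String) :
    stepA (eDict u) t = eDict (PySem.Set.add u t) := by
  by_cases hm : t ∈ u
  · rw [PySem.Set.add_of_mem hm]
    simp [stepA, PySem.Dict.contains_eq_decide_mem_keys, keys_eDict, hm]
  · rw [PySem.Set.add_of_not_mem hm]
    have hc : (eDict u).contains t = false := by
      simp [PySem.Dict.contains_eq_decide_mem_keys, keys_eDict, hm]
    simp only [stepA, hc, Bool.false_eq_true, if_false]
    rw [eDict_append]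
    apply PySem.Dict.ext
    rw [size_eDict]
    exact PySem.Dict.items_insert_of_not_contains (eDict u) _ hc

theorem foldl_stepA_eDict (ts : List String) (u : List String) (hu : u.Nodup) :
    ts.foldl stepA (eDict u) = eDict (PySem.Set.update u ts) := by
  induction ts generalizing u with
  | nil => simp [PySem.Set.update_nil]
  | cons t ts ih =>
      rw [List.foldl_cons, stepA_eDict u t, PySem.Set.update_cons]
      exact ih _ (PySem.Set.nodup_add u t hu)

-- set(xs) lists the distinct elements in strictly increasing first-occurrence order,
-- so sorting it by first-occurrence index is the identity.
theorem pairwise_idx_ofList (xs : List String) :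
    (PySem.Set.ofList xs).Pairwise
      (fun a b => ((PySem.List.index? xs a).getD 0 : Nat) < ((PySem.List.index? xs b).getD 0 : Nat)) := by
  induction xs using List.reverseRecOn with
  | nil => simp [PySem.Set.ofList]
  | append_singleton xs x ih =>
      have hof : PySem.Set.ofList (xs ++ [x]) = PySem.Set.add (PySem.Set.ofList xs) x := by
        rw [PySem.Set.ofList_eq_foldl, PySem.Set.ofList_eq_foldl, List.foldl_append]
        rfl
      have hmemsub : ∀ a ∈ PySem.Set.ofList xs, a ∈ xs := fun a ha => (PySem.Set.mem_ofList _ _).1 ha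
      have hidx : ∀ a ∈ PySem.Set.ofList xs,
          PySem.List.index? (xs ++ [x]) a = PySem.List.index? xs a := fun a ha =>
        PySem.List.index?_append_of_mem [x] (hmemsub a ha)
      by_cases hx : x ∈ xs
      · rw [hof, PySem.Set.add_of_mem ((PySem.Set.mem_ofList _ _).2 hx)]
        refine (ih.imp_of_mem ?_)
        intro a b ha hb h
        rwa [hidx a ha, hidx b hb]
      · rw [hof, PySem.Set.add_of_not_mem (fun h => hx (hmemsub x h))]
        rw [List.pairwise_append]
        refine ⟨(ih.imp_of_mem ?_), List.pairwise_singleton _ _, ?_⟩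
        · intro a b ha hb h
          rwa [hidx a ha, hidx b hb]
        · intro a ha b hb
          rw [List.mem_singleton] at hb; subst hb
          rw [hidx a ha, PySem.List.index?_append_singleton_self _ _ hx]
          have hax : a ∈ xs := hmemsub a ha
          obtain ⟨k, hk⟩ := Option.isSome_iff_exists.1 ((PySem.List.index?_isSome_iff _ _).2 hax)
          obtain ⟨hlt, -, -⟩ := PySem.List.getElem_of_index?_eq_some hk
          rw [hk]; simpa using hlt

theorem sorted_ofList_idx (xs : List String) :
    PySem.List.sorted (PySem.Set.ofList xs)
      (fun t => ((PySem.List.index? xs t).getD 0 : Nat)) false = PySem.Set.ofList xs :=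
  PySem.List.sorted_eq_of_perm_of_pairwise_lt _ _ _ (List.Perm.refl _) (pairwise_idx_ofList xs)

-- ===== VERDICT (by name: the statement is the Claim_ definition above) =====
theorem build_tool_map_spec : Claim_equal_build_tool_map := by
  intro records _ _
  unfold Spec_build_tool_map build_tool_map build_tool_map_alt
  have hfun : (fun (d : PySem.Dict String Int) record =>
      ((PySem.Dict.mk record).getD "ground_truth" ([] : List (List (String × String)))).foldl
        (fun d target =>
          match (PySem.Dict.mk target).get? "tool" with
          | none => d
          | some tool => if d.contains tool then d else d.insert tool ((PySem.Dict.size d : Nat) : Int))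
        d)
      = (fun (d : PySem.Dict String Int) record =>
          (((PySem.Dict.mk record).getD "ground_truth" ([] : List (List (String × String)))).filterMap
            (fun target => (PySem.Dict.mk target).get? "tool")).foldl stepA d) := by
    funext d record
    exact inner_loop_eq _ d
  rw [hfun, foldl_flatMap_inner, show PySem.Dict.empty = eDict [] from rfl,
      foldl_stepA_eDict _ [] List.nodup_nil]
  simp only [sorted_ofList_idx]
  rfl
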